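-- pv_equiv track=rewrite | github.com/edmundxlin/CCC-Solutions | CCC03S2/CCC03S2.py | checkRhyme
-- ===== SOURCE A (Python) =====
-- def checkRhyme(string1, string2):
--
--     string1 = string1[::-1]
--     string2 = string2[::-1]
--     string1 = string1.lower().strip()
--     string2 = string2.lower().strip()
--
--     if string1 == string2:
--         return True
--     vowels = ["a", "e", "i", "o", "u"]
--     vowelIndex1 = len(string1)
--     vowelIndex2 = len(string2)
--     for i in vowels:
--         if string1.find(i) < vowelIndex1 and string1.find(i) !=-1:
--             vowelIndex1 = string1.find(i)
--
--         if string2.find(i) < vowelIndex2 and string2.find(i) !=-1: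
--             vowelIndex2 = string2.find(i)
--
--
--     if string1[:vowelIndex1+1] == string2[:vowelIndex2+1]:
--         return True
--     else:
--         return False
-- ===== SOURCE B (Python) =====
-- def _tail(s):
--     # suffix of s from its last vowel (s itself if it has no vowel)
--     for i in range(len(s), 0, -1):
--         if s[i - 1] in ("a", "e", "i", "o", "u"):
--             return s[i - 1:]
--     return s
--
--
-- def checkRhyme(string1, string2):
--     return _tail(string1.lower().strip()) == _tail(string2.lower().strip())
-- ===== Notes on version B (the rewrite author's own statement) =====
-- stated objective: simpler
-- what changed: Instead of reversing both strings, running five forward find scans per word with min-index tracking plus an early equality check, B normalizes each word and does one backward scan that returns the suffix from the last vowel, then compares the two suffixes.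
import Mathlib
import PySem

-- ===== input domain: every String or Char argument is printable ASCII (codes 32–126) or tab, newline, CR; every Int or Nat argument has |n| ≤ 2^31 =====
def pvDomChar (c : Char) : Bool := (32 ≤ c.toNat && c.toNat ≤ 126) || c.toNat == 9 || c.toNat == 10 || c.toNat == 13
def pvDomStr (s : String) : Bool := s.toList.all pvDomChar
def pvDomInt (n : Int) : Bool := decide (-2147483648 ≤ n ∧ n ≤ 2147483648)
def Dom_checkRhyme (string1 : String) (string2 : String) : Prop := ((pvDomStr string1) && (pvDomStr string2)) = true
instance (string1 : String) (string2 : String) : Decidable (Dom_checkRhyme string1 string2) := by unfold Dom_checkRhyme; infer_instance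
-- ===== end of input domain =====

-- B replaces A's reverse-both-strings + five forward find scans with min-index tracking
-- by a single backward scan per word returning the suffix from the last vowel (simpler).


-- ===== PORT A =====
def checkRhyme (string1 : String) (string2 : String) : Bool :=
  -- string1[::-1] : PySem.List.slice?_none_none_neg_one says xs[::-1] is xs.reverse
  let s1 := string1.toList.reverse
  let s2 := string2.toList.reverse
  -- .lower().strip()
  let t1 := PySem.Chars.strip (PySem.Chars.lower s1)
  let t2 := PySem.Chars.strip (PySem.Chars.lower s2)
  if t1 = t2 then true
  else
    -- vowels = ["a", "e", "i", "o", "u"]; the loop updates vowelIndex1/vowelIndex2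
    let vowels : List (List Char) := [['a'], ['e'], ['i'], ['o'], ['u']]
    let vi := vowels.foldl
      (fun (vi : Int × Int) v =>
        ((if PySem.Chars.find t1 v < vi.1 ∧ PySem.Chars.find t1 v ≠ -1 then PySem.Chars.find t1 v else vi.1),
         (if PySem.Chars.find t2 v < vi.2 ∧ PySem.Chars.find t2 v ≠ -1 then PySem.Chars.find t2 v else vi.2)))
      ((t1.length : Int), (t2.length : Int))
    -- string1[:vowelIndex1+1] == string2[:vowelIndex2+1]
    if PySem.Chars.slice t1 none (some (vi.1 + 1)) = PySem.Chars.slice t2 none (some (vi.2 + 1)) then true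
    else false

-- ===== PORT B =====
-- Source B's _tail loop 'for i in range(len(s), 0, -1)': countdown on i; s[i-1] is
-- PySem.List.pyGetD at index i-1, s[i-1:] is List.drop (PySem.List.slice_from_natCast)
def tailLoop (l : List Char) : Nat → List Char
  | 0 => l
  | i + 1 =>
    if (['a', 'e', 'i', 'o', 'u'] : List Char).contains (PySem.List.pyGetD l (i : Int) ' ')
    then l.drop i
    else tailLoop l i

def checkRhyme_alt (string1 : String) (string2 : String) : Bool :=
  let t1 := PySem.Chars.strip (PySem.Chars.lower string1.toList)
  let t2 := PySem.Chars.strip (PySem.Chars.lower string2.toList)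
  tailLoop t1 t1.length == tailLoop t2 t2.length

-- ===== PRECONDITION & SPEC =====
def Spec_checkRhyme (string1 : String) (string2 : String) (out : Bool) : Prop := out = checkRhyme_alt string1 string2
instance (string1 : String) (string2 : String) (out : Bool) : Decidable (Spec_checkRhyme string1 string2 out) := by unfold Spec_checkRhyme; infer_instance

-- ===== CLAIM (what is proved, stated in full; the proofs are below) =====
def Claim_equal_checkRhyme : Prop := ∀ (string1 : String) (string2 : String), Dom_checkRhyme string1 string2 → Spec_checkRhyme string1 string2 (checkRhyme string1 string2)

-- ===== LEMMAS AND PROOFS =====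

-- the vowel test both programs implement
def pvVow (c : Char) : Bool := (['a', 'e', 'i', 'o', 'u'] : List Char).contains c

-- the value A's loop keeps for one word: find's index, or the length when find returned -1
def pvG (r : List Char) (c : Char) : Int :=
  if PySem.Chars.find r [c] = -1 then (r.length : Int) else PySem.Chars.find r [c]

-- trimming whitespace from the two ends commutes
theorem pv_lr_comm (l : List Char) :
    List.dropWhile PySem.Chars.isspace (List.dropWhile PySem.Chars.isspace l.reverse).reverse
      = (List.dropWhile PySem.Chars.isspace (List.dropWhile PySem.Chars.isspace l).reverse).reverse := by
  induction l with
  | nil => simp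
  | cons a t ih =>
    by_cases h : PySem.Chars.isspace a
    · rw [List.reverse_cons, List.dropWhile_append,
        List.dropWhile_cons_of_pos (l := t) (by simpa using h)]
      by_cases he : List.dropWhile PySem.Chars.isspace t.reverse = []
      · have hall : ∀ x ∈ t, PySem.Chars.isspace x := by
          intro x hx
          exact (List.dropWhile_eq_nil_iff.mp he) x (by simpa using hx)
        have ht : List.dropWhile PySem.Chars.isspace t = [] :=
          List.dropWhile_eq_nil_iff.mpr hall
        simp [he, ht, h]
      · simp only [List.isEmpty_iff, he, if_false, List.reverse_append, List.reverse_cons,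
          List.reverse_nil, List.nil_append, List.singleton_append]
        rw [List.dropWhile_cons_of_pos (by simpa using h)]
        exact ih
    · rw [List.reverse_cons, List.dropWhile_append,
        List.dropWhile_cons_of_neg (l := t) (by simpa using h)]
      by_cases he : List.dropWhile PySem.Chars.isspace t.reverse = []
      · rw [List.reverse_cons, List.dropWhile_append]
        simp [he, List.dropWhile, h]
      · simp only [List.isEmpty_iff, he, if_false, List.reverse_append, List.reverse_cons,
          List.reverse_nil, List.nil_append, List.singleton_append]
        rw [List.dropWhile_cons_of_neg (by simpa using h)]
        simp [List.reverse_cons, List.dropWhile_append, he]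
  done

theorem pv_strip_reverse (l : List Char) :
    PySem.Chars.strip l.reverse = (PySem.Chars.strip l).reverse := by
  simp only [PySem.Chars.strip, PySem.Chars.lstrip, PySem.Chars.rstrip]
  rw [pv_lr_comm, List.reverse_reverse]

theorem pv_norm_eq (s : String) :
    PySem.Chars.strip (PySem.Chars.lower s.toList.reverse)
      = (PySem.Chars.strip (PySem.Chars.lower s.toList)).reverse := by
  have : PySem.Chars.lower s.toList.reverse = (PySem.Chars.lower s.toList).reverse := by
    simp [PySem.Chars.lower]
  rw [this, pv_strip_reverse]

-- B's loop: the suffix from the last vowel among the first n characters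
theorem pv_tailLoop_eq (l : List Char) (n : Nat) (hn : n ≤ l.length) :
    tailLoop l n =
      (if List.findIdx pvVow ((l.take n).reverse) < n
       then l.drop (n - 1 - List.findIdx pvVow ((l.take n).reverse)) else l) := by
  induction n with
  | zero => simp [tailLoop]
  | succ n ih =>
    have hlt : n < l.length := hn
    have hget : PySem.List.pyGetD l (n : Int) ' ' = l[n] := by
      rw [PySem.List.pyGetD_natCast]
      simp [List.getD_eq_getElem?_getD, List.getElem?_eq_getElem hlt]
    have htake : (l.take (n + 1)).reverse = l[n] :: (l.take n).reverse := by
      rw [List.take_succ, List.getElem?_eq_getElem hlt]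
      simp
    rw [tailLoop, hget, htake]
    by_cases hv : pvVow l[n] = true
    · have hctrue : (['a', 'e', 'i', 'o', 'u'] : List Char).contains l[n] = true := hv
      rw [if_pos hctrue, List.findIdx_cons, hv]
      simp
    · have hv' : pvVow l[n] = false := Bool.eq_false_iff.mpr hv
      have hc : (['a', 'e', 'i', 'o', 'u'] : List Char).contains l[n] = false := hv'
      rw [if_neg (ne_true_of_eq_false hc), ih (Nat.le_of_lt hlt), List.findIdx_cons, hv']
      simp only [cond_false]
      by_cases hj : List.findIdx pvVow ((l.take n).reverse) < n
      · rw [if_pos hj, if_pos (by omega)]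
        congr 1
        omega
      · rw [if_neg hj, if_neg (by omega)]
  done

theorem pv_singleton_infix (c : Char) (r : List Char) : [c] <:+: r ↔ c ∈ r := by
  constructor
  · intro h
    exact h.sublist.subset (by simp)
  · intro h
    obtain ⟨s, t, rfl⟩ := List.append_of_mem h
    exact ⟨s, t, by simp⟩

theorem pv_find_singleton_neg (r : List Char) (c : Char) :
    PySem.Chars.find r [c] = -1 ↔ c ∉ r := by
  rw [PySem.Chars.find_eq_neg_one_iff, pv_singleton_infix]

theorem pv_find_singleton_spec (r : List Char) (c : Char) (h : PySem.Chars.find r [c] ≠ -1) :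
    ∃ k : Nat, PySem.Chars.find r [c] = (k : Int) ∧ k < r.length ∧ r[k]? = some c ∧
      ∀ i : Nat, i < k → r[i]? ≠ some c := by
  have h0 : 0 ≤ PySem.Chars.find r [c] := by
    have := PySem.Chars.neg_one_le_find r [c]
    omega
  obtain ⟨hpre, hmin⟩ := PySem.Chars.find_spec (s := r) (sub := [c]) h0
  refine ⟨(PySem.Chars.find r [c]).toNat, by omega, ?_, ?_, ?_⟩
  · by_contra hk
    push_neg at hk
    rw [List.drop_of_length_le hk] at hpre
    rcases hpre with ⟨t, ht⟩
    simp at ht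
  · have hk : (PySem.Chars.find r [c]).toNat < r.length := by
      by_contra hk
      push_neg at hk
      rw [List.drop_of_length_le hk] at hpre
      rcases hpre with ⟨t, ht⟩
      simp at ht
    rcases hpre with ⟨t, ht⟩
    rw [List.drop_eq_getElem_cons hk, List.singleton_append] at ht
    have h1 := (List.cons_eq_cons.mp ht).1
    rw [List.getElem?_eq_getElem hk, ← h1]
  · intro i hi hic
    have hilen : i < r.length := by
      by_contra hbad
      push_neg at hbad
      rw [List.getElem?_eq_none_iff.mpr hbad] at hic
      simp at hic
    apply hmin i hi
    refine ⟨r.drop (i + 1), ?_⟩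
    rw [List.drop_eq_getElem_cons hilen]
    rw [List.getElem?_eq_getElem hilen] at hic
    simp only [Option.some.injEq] at hic
    simp [hic]
  done

theorem pv_G_bounds (r : List Char) (c : Char) : 0 ≤ pvG r c ∧ pvG r c ≤ (r.length : Int) := by
  unfold pvG
  have h1 := PySem.Chars.neg_one_le_find r [c]
  have h2 := PySem.Chars.find_le_length r [c]
  split_ifs with h <;> omega

theorem pv_fold_min (r : List Char) :
    ∀ (vs : List Char) (a : Int), 0 ≤ a → a ≤ (r.length : Int) →
    vs.foldl (fun vi c =>
        if PySem.Chars.find r [c] < vi ∧ PySem.Chars.find r [c] ≠ -1 then PySem.Chars.find r [c] else vi) a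
      = (vs.map (pvG r)).foldl min a := by
  intro vs
  induction vs with
  | nil => intro a _ _; rfl
  | cons c vs ih =>
    intro a ha0 halen
    have hstep :
        (if PySem.Chars.find r [c] < a ∧ PySem.Chars.find r [c] ≠ -1 then PySem.Chars.find r [c] else a)
          = min a (pvG r c) := by
      unfold pvG
      by_cases hf : PySem.Chars.find r [c] = -1
      · simp [hf]
        omega
      · simp [hf]
        rw [Int.min_def]
        split_ifs <;> omega
    have hb := pv_G_bounds r c
    simp only [List.foldl_cons, List.map_cons, hstep]
    exact ih (min a (pvG r c)) (by omega) (by omega)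

theorem pv_min_eq_findIdx (r : List Char) :
    ((['a', 'e', 'i', 'o', 'u'] : List Char).map (pvG r)).foldl min (r.length : Int)
      = (List.findIdx pvVow r : Int) := by
  have hle := PySem.List.foldl_min_le ((['a', 'e', 'i', 'o', 'u'] : List Char).map (pvG r)) ((r.length : Int))
  have hmem := PySem.List.foldl_min_mem ((['a', 'e', 'i', 'o', 'u'] : List Char).map (pvG r)) ((r.length : Int))
  have hKlen : List.findIdx pvVow r ≤ r.length := List.findIdx_le_length
  apply le_antisymm
  · by_cases hK : List.findIdx pvVow r < r.length
    · have hvow : pvVow (r[List.findIdx pvVow r]) := List.findIdx_getElem (w := hK)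
      have hmemr : r[List.findIdx pvVow r] ∈ r := List.getElem_mem _
      have hf : PySem.Chars.find r [r[List.findIdx pvVow r]] ≠ -1 := by
        rw [Ne, pv_find_singleton_neg]
        simp [hmemr]
      obtain ⟨k, hkeq, hklen, hkat, hkmin⟩ := pv_find_singleton_spec r _ hf
      have hkK : k ≤ List.findIdx pvVow r := by
        by_contra hbad
        push_neg at hbad
        exact hkmin _ hbad (List.getElem?_eq_getElem hK)
      have hgc : pvG r (r[List.findIdx pvVow r]) ≤ (List.findIdx pvVow r : Int) := by
        unfold pvG
        rw [if_neg hf, hkeq]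
        exact_mod_cast hkK
      have hmemv : r[List.findIdx pvVow r] ∈ (['a', 'e', 'i', 'o', 'u'] : List Char) := by
        simpa [pvVow] using hvow
      calc _ ≤ pvG r (r[List.findIdx pvVow r]) := hle.2 _ (List.mem_map_of_mem hmemv)
        _ ≤ _ := hgc
    · have : List.findIdx pvVow r = r.length := by omega
      rw [this]
      exact hle.1
  · rcases hmem with h | h
    · rw [h]
      exact_mod_cast hKlen
    · rw [List.mem_map] at h
      obtain ⟨c, hcv, hgc⟩ := h
      rw [← hgc]
      unfold pvG
      by_cases hf : PySem.Chars.find r [c] = -1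
      · rw [if_pos hf]
        exact_mod_cast hKlen
      · rw [if_neg hf]
        obtain ⟨k, hkeq, hklen, hkat, _⟩ := pv_find_singleton_spec r c hf
        rw [hkeq]
        have hck : r[k] = c := by
          rw [List.getElem?_eq_getElem hklen] at hkat
          simpa using hkat
        have hvk : pvVow r[k] := by
          rw [hck]
          simpa [pvVow] using hcv
        have : List.findIdx pvVow r ≤ k := by
          by_contra hbad
          push_neg at hbad
          exact absurd hvk (by simpa using List.not_of_lt_findIdx hbad)
        exact_mod_cast this
  done

theorem pv_fold_eq_findIdx (r : List Char) :
    (([['a'], ['e'], ['i'], ['o'], ['u']] : List (List Char)).foldl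
      (fun (vi : Int) v => if PySem.Chars.find r v < vi ∧ PySem.Chars.find r v ≠ -1 then PySem.Chars.find r v else vi)
      (r.length : Int)) = (List.findIdx pvVow r : Int) := by
  have hmap : ([['a'], ['e'], ['i'], ['o'], ['u']] : List (List Char))
      = (['a', 'e', 'i', 'o', 'u'] : List Char).map (fun c => [c]) := rfl
  rw [hmap, List.foldl_map, pv_fold_min r _ _ (by positivity) le_rfl, pv_min_eq_findIdx]

theorem pv_reverse_drop (l : List Char) (n : Nat) :
    (l.drop n).reverse = l.reverse.take (l.length - n) := by
  conv_lhs => rw [show l.drop n = l.drop n from rfl]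
  have h : l.reverse = (l.drop n).reverse ++ (l.take n).reverse := by
    rw [← List.reverse_append, List.take_append_drop]
  rw [h, List.take_left' (by simp)]

theorem pv_tail_reverse (l : List Char) :
    (tailLoop l l.length).reverse = l.reverse.take (List.findIdx pvVow l.reverse + 1) := by
  have h := pv_tailLoop_eq l l.length le_rfl
  rw [List.take_length] at h
  by_cases hK : List.findIdx pvVow l.reverse < l.length
  · rw [h, if_pos hK, pv_reverse_drop]
    congr 1
    omega
  · rw [h, if_neg hK]
    rw [List.take_of_length_le (by simp; omega)]

-- ===== VERDICT (by name: the statement is the Claim_ definition above) =====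
theorem checkRhyme_spec : Claim_equal_checkRhyme := by
  intro s1 s2 _
  unfold Spec_checkRhyme checkRhyme checkRhyme_alt
  simp only [pv_norm_eq]
  set l1 := PySem.Chars.strip (PySem.Chars.lower s1.toList) with hl1
  set l2 := PySem.Chars.strip (PySem.Chars.lower s2.toList) with hl2
  by_cases he : l1.reverse = l2.reverse
  · have heq : l1 = l2 := List.reverse_inj.mp he
    simp [heq]
  · rw [if_neg he]
    rw [PySem.List.foldl_prod_mk
      (f := fun vi v => if PySem.Chars.find l1.reverse v < vi ∧ PySem.Chars.find l1.reverse v ≠ -1 then PySem.Chars.find l1.reverse v else vi)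
      (g := fun vi v => if PySem.Chars.find l2.reverse v < vi ∧ PySem.Chars.find l2.reverse v ≠ -1 then PySem.Chars.find l2.reverse v else vi)]
    simp only [pv_fold_eq_findIdx]
    have hsl1 : PySem.Chars.slice l1.reverse none (some ((List.findIdx pvVow l1.reverse : Int) + 1))
        = l1.reverse.take (List.findIdx pvVow l1.reverse + 1) := by
      rw [PySem.Chars.slice_eq_listSlice]
      rw [show ((List.findIdx pvVow l1.reverse : Int) + 1) = ((List.findIdx pvVow l1.reverse + 1 : Nat) : Int) by push_cast; ring]
      exact PySem.List.slice_to_natCast _ _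
    have hsl2 : PySem.Chars.slice l2.reverse none (some ((List.findIdx pvVow l2.reverse : Int) + 1))
        = l2.reverse.take (List.findIdx pvVow l2.reverse + 1) := by
      rw [PySem.Chars.slice_eq_listSlice]
      rw [show ((List.findIdx pvVow l2.reverse : Int) + 1) = ((List.findIdx pvVow l2.reverse + 1 : Nat) : Int) by push_cast; ring]
      exact PySem.List.slice_to_natCast _ _
    simp only [hsl1, hsl2, ← pv_tail_reverse]
    by_cases hT : tailLoop l1 l1.length = tailLoop l2 l2.length
    · simp [hT]
    · rw [if_neg (by simpa [List.reverse_inj] using hT)]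
      simp [beq_iff_eq, hT]
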